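-- pv_equiv track=rewrite | github.com/daniel-reich/ubiquitous-fiesta | MFteyMABeuGaga3a7_23.py | color_pattern_times
-- ===== SOURCE A (Python) =====
-- def color_pattern_times(cols):
--   if cols == []:
--     return 0
--   sum = 2
--   for i in range(1, len(cols)):
--     if cols[i] != cols[i-1]:
--       sum += 1
--     sum += 2
--   return sum
-- ===== SOURCE B (Python) =====
-- def color_pattern_times(cols):
--   runs = []
--   for c in cols:
--     if runs == [] or c != runs[-1]:
--       runs.append(c)
--   if runs == []:
--     return 0
--   return 2 * len(cols) + len(runs) - 1
-- ===== Notes on version B (the rewrite author's own statement) =====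
-- stated objective: alternative
-- what changed: Replaces A's single accumulator loop (seeded at 2, +2 per index, +1 on each adjacent change) by two stages: first run-length-compress the list into its distinct consecutive runs, then return the closed formula 2*len(cols) + (number of runs) - 1 (0 when empty).
import Mathlib
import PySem

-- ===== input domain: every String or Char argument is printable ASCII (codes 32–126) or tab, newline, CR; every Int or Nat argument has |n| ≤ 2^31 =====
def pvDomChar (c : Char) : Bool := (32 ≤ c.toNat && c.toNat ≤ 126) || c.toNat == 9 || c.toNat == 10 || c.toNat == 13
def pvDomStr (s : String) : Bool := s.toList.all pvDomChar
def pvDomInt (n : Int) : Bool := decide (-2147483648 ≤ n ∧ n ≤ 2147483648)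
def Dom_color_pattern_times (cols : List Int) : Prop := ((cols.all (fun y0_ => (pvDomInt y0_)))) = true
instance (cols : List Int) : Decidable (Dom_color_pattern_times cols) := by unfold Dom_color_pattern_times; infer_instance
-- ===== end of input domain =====

-- B replaces A's accumulator loop by two stages: run-length-compress the list,
-- then the closed formula 2*len + (#runs) - 1; objective: alternative.


-- ===== PORT A =====
def color_pattern_times (cols : List Int) : Int :=
  if cols = [] then 0
  else
    (PySem.List.pyRange 1 cols.length 1).foldl
      (fun sum i =>
        (if PySem.List.pyGetD cols i 0 ≠ PySem.List.pyGetD cols (i - 1) 0 then sum + 1 else sum) + 2) 2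

-- ===== PORT B =====
def color_pattern_times_alt (cols : List Int) : Int :=
  let runs := cols.foldl
    (fun runs c => if runs = [] ∨ c ≠ PySem.List.pyGetD runs (-1) 0 then runs ++ [c] else runs) []
  if runs = [] then 0 else 2 * (cols.length : Int) + runs.length - 1

-- ===== PRECONDITION & SPEC =====
def Spec_color_pattern_times (cols : List Int) (out : Int) : Prop := out = color_pattern_times_alt cols
instance (cols : List Int) (out : Int) : Decidable (Spec_color_pattern_times cols out) := by unfold Spec_color_pattern_times; infer_instance

-- ===== CLAIM (what is proved, stated in full; the proofs are below) =====
def Claim_equal_color_pattern_times : Prop := ∀ (cols : List Int), Dom_color_pattern_times cols → Spec_color_pattern_times cols (color_pattern_times cols)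

-- ===== LEMMAS AND PROOFS =====

-- structural count of adjacent-difference positions (proof-only helper)
def pvCount : List Int → Int
  | a :: b :: t => (if a ≠ b then 1 else 0) + pvCount (b :: t)
  | _ => 0

-- the run-compression fold: starting from a nonempty accumulator r' ++ [x], the final
-- length is |r'| + 1 + the structural adjacent-difference count of x :: l
theorem pv_runs_len (l : List Int) (r' : List Int) (x : Int) :
    (((l.foldl
        (fun runs c => if runs = [] ∨ c ≠ PySem.List.pyGetD runs (-1) 0 then runs ++ [c] else runs)
        (r' ++ [x])).length : Int))
      = (r'.length : Int) + 1 + pvCount (x :: l) := by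
  induction l generalizing r' x with
  | nil => simp [pvCount]
  | cons c l ih =>
    simp only [List.foldl_cons]
    rw [PySem.List.pyGetD_neg_one_append_singleton]
    by_cases hcx : c = x
    · rw [if_neg (by simp [hcx])]
      rw [ih r' x]
      simp [pvCount, hcx]
    · rw [if_pos (Or.inr hcx)]
      rw [ih (r' ++ [x]) c]
      simp only [pvCount, List.length_append, List.length_singleton]
      rw [if_pos (fun h => hcx h.symm)]
      push_cast
      ring

-- the structural count is nonnegative
theorem pvCount_nonneg (l : List Int) : 0 ≤ pvCount l := by
  fun_induction pvCount l with
  | case1 a b t ih => dsimp only; split_ifs <;> omega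
  | case2 => simp

-- B equals 2*len plus the structural adjacent-difference count
theorem pv_alt_eq (cols : List Int) :
    color_pattern_times_alt cols = 2 * (cols.length : Int) + pvCount cols := by
  cases cols with
  | nil => simp [color_pattern_times_alt, pvCount]
  | cons a l =>
    unfold color_pattern_times_alt
    simp only [List.foldl_cons]
    rw [if_pos (Or.inl trivial)]
    simp only [List.nil_append]
    have h := pv_runs_len l [] a
    simp only [List.nil_append, List.length_nil, Nat.cast_zero] at h
    have hne : (l.foldl
        (fun runs c => if runs = [] ∨ c ≠ PySem.List.pyGetD runs (-1) 0 then runs ++ [c] else runs)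
        [a]) ≠ [] := by
      intro he
      rw [he] at h
      simp only [List.length_nil, Nat.cast_zero] at h
      have := pvCount_nonneg (a :: l)
      omega
    rw [if_neg hne, h]
    ring

-- A's loop body over any index list equals start + 2*length + number of indices passing the test
theorem pv_foldl_count (p : Int → Prop) [DecidablePred p] (l : List Int) (s : Int) :
    l.foldl (fun sum i => (if p i then sum + 1 else sum) + 2) s
      = s + 2 * (l.length : Int) + ((l.filter p).length : Int) := by
  induction l generalizing s with
  | nil => simp
  | cons x xs ih =>
    simp only [List.foldl_cons, List.filter_cons, ih]
    by_cases h : p x <;> simp [h] <;> ring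

-- the indexed filter count over range(1, len) equals the structural count
theorem pv_filter_eq_count (l : List Int) (a : Int) :
    (((PySem.List.pyRange 1 ((a :: l).length : Int) 1).filter
        (fun i => PySem.List.pyGetD (a :: l) i 0 ≠ PySem.List.pyGetD (a :: l) (i - 1) 0)).length : Int)
      = pvCount (a :: l) := by
  induction l generalizing a with
  | nil => simp [PySem.List.pyRange_one_eq_nil, pvCount]
  | cons b t ih =>
    have hcons : PySem.List.pyRange 1 (((a :: b :: t).length : Int)) 1
        = 1 :: PySem.List.pyRange 2 (((a :: b :: t).length : Int)) 1 := by
      rw [PySem.List.pyRange_one_cons (by simp)]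
      norm_num
    have hshift : PySem.List.pyRange 2 (((a :: b :: t).length : Int)) 1
        = (PySem.List.pyRange 1 (((b :: t).length : Int)) 1).map (· + 1) := by
      rw [PySem.List.pyRange_one, PySem.List.pyRange_one, List.map_map]
      have hlen : (((a :: b :: t).length : Int) - 2).toNat = (((b :: t).length : Int) - 1).toNat := by
        simp; omega
      rw [hlen]
      apply List.map_congr_left
      intro k _; simp; ring
    rw [hcons, hshift]
    simp only [List.filter_cons, List.filter_map]
    have hpt : List.filter
          ((fun i => decide (PySem.List.pyGetD (a :: b :: t) i 0 ≠ PySem.List.pyGetD (a :: b :: t) (i - 1) 0)) ∘ (· + 1))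
          (PySem.List.pyRange 1 (((b :: t).length : Int)) 1)
        = List.filter
          (fun i => decide (PySem.List.pyGetD (b :: t) i 0 ≠ PySem.List.pyGetD (b :: t) (i - 1) 0))
          (PySem.List.pyRange 1 (((b :: t).length : Int)) 1) := by
      apply List.filter_congr
      intro i hi
      rw [PySem.List.mem_pyRange_one] at hi
      obtain ⟨k, rfl⟩ : ∃ k : Nat, i = (k : Int) + 1 := ⟨(i - 1).toNat, by omega⟩
      have g1 : PySem.List.pyGetD (a :: b :: t) ((k : Int) + 1 + 1) 0 = PySem.List.pyGetD (b :: t) ((k : Int) + 1) 0 := by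
        have h1 : ((k : Int) + 1 + 1) = ((k + 2 : Nat) : Int) := by push_cast; ring
        have h2 : ((k : Int) + 1) = ((k + 1 : Nat) : Int) := by push_cast; ring
        rw [h1, h2, PySem.List.pyGetD_natCast, PySem.List.pyGetD_natCast]
        simp
      have g2 : PySem.List.pyGetD (a :: b :: t) ((k : Int) + 1 + 1 - 1) 0 = PySem.List.pyGetD (b :: t) ((k : Int) + 1 - 1) 0 := by
        have h1 : ((k : Int) + 1 + 1 - 1) = ((k + 1 : Nat) : Int) := by push_cast; ring
        have h2 : ((k : Int) + 1 - 1) = ((k : Nat) : Int) := by omega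
        rw [h1, h2, PySem.List.pyGetD_natCast, PySem.List.pyGetD_natCast]
        simp
      show (decide (PySem.List.pyGetD (a :: b :: t) ((k : Int) + 1 + 1) 0 ≠ PySem.List.pyGetD (a :: b :: t) ((k : Int) + 1 + 1 - 1) 0)) = _
      rw [g1, g2]
    rw [hpt]
    have hget : PySem.List.pyGetD (a :: b :: t) 1 0 = b := by
      simp [PySem.List.pyGetD]
    have hget0 : PySem.List.pyGetD (a :: b :: t) (1 - 1) 0 = a := by
      norm_num [PySem.List.pyGetD]
    rw [hget, hget0]
    have hrec := ih b
    by_cases hba : b = a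
    · rw [if_neg (by simp [hba])]
      simp only [List.length_map]
      rw [hrec]
      simp [pvCount, hba]
    · rw [if_pos (by simp [hba])]
      simp only [List.length_cons, List.length_map, Nat.cast_add, Nat.cast_one]
      simp only [List.length_cons, Nat.cast_add, Nat.cast_one] at hrec
      rw [hrec]
      have hab : ¬ (a = b) := fun h => hba h.symm
      simp only [pvCount]
      rw [if_pos (show a ≠ b from hab)]
      ring

-- ===== VERDICT (by name: the statement is the Claim_ definition above) =====
theorem color_pattern_times_spec : Claim_equal_color_pattern_times := by
  intro cols _
  unfold Spec_color_pattern_times color_pattern_times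
  rw [pv_alt_eq]
  cases cols with
  | nil => simp [pvCount]
  | cons a l =>
    rw [if_neg (by simp)]
    rw [pv_foldl_count]
    rw [PySem.List.length_pyRange_one]
    rw [← pv_filter_eq_count l a]
    have : ((((a :: l).length : Int) - 1).toNat : Int) = ((a :: l).length : Int) - 1 := by
      simp only [List.length_cons]; omega
    rw [this]
    ring
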